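-- pv_equiv track=rewrite | github.com/KeerSun/interview | interveiw.py | formGroups
-- ===== SOURCE A (Python) =====
-- def formGroups(room, odd, group3, pairs):  #O(n)
--     if (odd and group3):
--         group = [room[0],room[1],room[2]]
--         pairs.append(group)
--         room = room[3:]
--     while len(room) > 1:
--         pair = [room[0],room[1]]
--         pairs.append(pair)
--         room = room[2:]
--     return pairs,room
-- ===== SOURCE B (Python) =====
-- def formGroups(room, odd, group3, pairs):
--     body = room
--     if odd and group3:
--         pairs.append([room[0], room[1], room[2]])
--         body = room[3:]
--     m = len(body) // 2
--     pairs.extend([body[2 * j], body[2 * j + 1]] for j in range(m))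
--     return pairs, body[2 * m:]
-- ===== Notes on version B (the rewrite author's own statement) =====
-- stated objective: faster
-- what changed: Replaces A's while loop that re-slices the list (room = room[2:]) on every iteration with a single index-based pass over range(len//2) plus one final slice for the remainder.
import Mathlib
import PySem

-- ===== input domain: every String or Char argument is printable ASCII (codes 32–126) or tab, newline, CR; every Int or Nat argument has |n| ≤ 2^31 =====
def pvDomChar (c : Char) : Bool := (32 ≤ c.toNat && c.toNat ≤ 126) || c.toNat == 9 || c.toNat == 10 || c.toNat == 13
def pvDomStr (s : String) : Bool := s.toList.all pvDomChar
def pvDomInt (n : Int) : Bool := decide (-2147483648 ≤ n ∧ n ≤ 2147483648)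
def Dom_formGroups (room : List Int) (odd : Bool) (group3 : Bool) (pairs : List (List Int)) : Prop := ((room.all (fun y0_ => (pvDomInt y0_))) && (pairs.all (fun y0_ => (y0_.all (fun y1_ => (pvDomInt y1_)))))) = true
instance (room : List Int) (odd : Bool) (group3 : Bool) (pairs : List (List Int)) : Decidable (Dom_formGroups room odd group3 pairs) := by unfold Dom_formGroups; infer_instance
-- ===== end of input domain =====

-- B replaces A's quadratic loop (re-slicing the list each iteration) with one index-based
-- pass plus a single final slice; equivalence is about the RETURN value (both Pythons also
-- mutate `pairs` in place identically, by one append plus one extend/append per pair).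

-- ===== PORT A =====
-- while len(room) > 1: pair = [room[0], room[1]]; pairs.append(pair); room = room[2:]
def formGroupsLoop : List Int → List (List Int) → List (List Int) × List Int
  | a :: b :: rest, pairs => formGroupsLoop rest (pairs ++ [[a, b]])
  | room, pairs => (pairs, room)

def formGroups (room : List Int) (odd : Bool) (group3 : Bool) (pairs : List (List Int)) : List (List Int) × List Int :=
  if odd && group3 then
    -- room[0], room[1], room[2]: in range under Pre_ (A raises IndexError otherwise)
    let group := [PySem.List.pyGetD room 0 0, PySem.List.pyGetD room 1 0, PySem.List.pyGetD room 2 0]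
    formGroupsLoop (PySem.List.slice room (some 3) none) (pairs ++ [group])
  else
    formGroupsLoop room pairs

-- ===== PORT B =====
def formGroups_alt (room : List Int) (odd : Bool) (group3 : Bool) (pairs : List (List Int)) : List (List Int) × List Int :=
  let body := if odd && group3 then PySem.List.slice room (some 3) none else room
  let pairs1 := if odd && group3 then
      pairs ++ [[PySem.List.pyGetD room 0 0, PySem.List.pyGetD room 1 0, PySem.List.pyGetD room 2 0]]
    else pairs
  let m : Int := PySem.Int.floordiv (PySem.List.len body) 2
  let pairs2 := pairs1 ++ (PySem.List.pyRange 0 m 1).map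
      (fun j => [PySem.List.pyGetD body (2 * j) 0, PySem.List.pyGetD body (2 * j + 1) 0])
  (pairs2, PySem.List.slice body (some (2 * m)) none)

-- ===== PRECONDITION & SPEC =====
-- Pre_ excludes only the inputs where A raises IndexError (odd ∧ group3 with fewer than 3 rooms);
-- B raises there too.
def Pre_formGroups (room : List Int) (odd : Bool) (group3 : Bool) (pairs : List (List Int)) : Prop :=
  (odd && group3) = true → 3 ≤ room.length
instance (room : List Int) (odd : Bool) (group3 : Bool) (pairs : List (List Int)) : Decidable (Pre_formGroups room odd group3 pairs) := by unfold Pre_formGroups; infer_instance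

def pvWitness_formGroups : List Int × Bool × Bool × List (List Int) := ([1, 2, 3, 4, 5], true, true, [[7, 8]])

def Spec_formGroups (room : List Int) (odd : Bool) (group3 : Bool) (pairs : List (List Int)) (out : List (List Int) × List Int) : Prop := out = formGroups_alt room odd group3 pairs
instance (room : List Int) (odd : Bool) (group3 : Bool) (pairs : List (List Int)) (out : List (List Int) × List Int) : Decidable (Spec_formGroups room odd group3 pairs out) := by unfold Spec_formGroups; infer_instance

-- ===== CLAIM (what is proved, stated in full; the proofs are below) =====
def Claim_equal_formGroups : Prop := ∀ (room : List Int) (odd : Bool) (group3 : Bool) (pairs : List (List Int)), Dom_formGroups room odd group3 pairs → Pre_formGroups room odd group3 pairs → Spec_formGroups room odd group3 pairs (formGroups room odd group3 pairs)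

-- ===== LEMMAS AND PROOFS =====

-- A's pairing loop, characterised by B's index formula over the same tail.
theorem formGroupsLoop_eq (t : List Int) (pairs : List (List Int)) :
    formGroupsLoop t pairs =
      (pairs ++ (List.range (t.length / 2)).map
        (fun (j : Nat) => [PySem.List.pyGetD t ((2 * j : Nat) : Int) 0, PySem.List.pyGetD t ((2 * j + 1 : Nat) : Int) 0]),
       t.drop (2 * (t.length / 2))) := by
  induction t, pairs using formGroupsLoop.induct with
  | case1 a b rest pairs ih =>
    rw [formGroupsLoop, ih]
    have hlen : (a :: b :: rest).length / 2 = rest.length / 2 + 1 := by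
      have h2 : (a :: b :: rest).length = rest.length + 2 := by simp
      omega
    rw [hlen, List.range_succ_eq_map]
    simp only [List.map_cons, List.map_map, Prod.mk.injEq]
    constructor
    · simp only [List.append_assoc, List.cons_append, List.nil_append]
      congr 1
      have ha : PySem.List.pyGetD (a :: b :: rest) ((2 * 0 : Nat) : Int) 0 = a := by
        norm_num [PySem.List.pyGetD_zero_cons]
      have hb : PySem.List.pyGetD (a :: b :: rest) ((2 * 0 + 1 : Nat) : Int) 0 = b := by
        have := PySem.List.pyGetD_ofNat (xs := a :: b :: rest) (n := 1) (d := 0) (by simp)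
        simpa using this
      rw [ha, hb]
      congr 1
      apply List.map_congr_left
      intro k _
      simp only [Function.comp, PySem.List.pyGetD, PySem.List.pyGet?_natCast]
      rw [show 2 * Nat.succ k = 2 * k + 1 + 1 from by omega]
      simp [List.getElem?_cons_succ]
    · have : 2 * (rest.length / 2 + 1) = 2 * (rest.length / 2) + 1 + 1 := by ring
      rw [this]
      simp [List.drop_succ_cons]
  | case2 room pairs h =>
    rcases room with _ | ⟨a, t⟩
    · simp [formGroupsLoop]
    rcases t with _ | ⟨b, r⟩
    · simp [formGroupsLoop]
    exact (h a b r rfl).elim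

-- B's range-map in Nat form.
theorem alt_map_eq (body : List Int) :
    (PySem.List.pyRange 0 (PySem.Int.floordiv (PySem.List.len body) 2) 1).map
        (fun j => [PySem.List.pyGetD body (2 * j) 0, PySem.List.pyGetD body (2 * j + 1) 0])
      = (List.range (body.length / 2)).map
        (fun (j : Nat) => [PySem.List.pyGetD body ((2 * j : Nat) : Int) 0, PySem.List.pyGetD body ((2 * j + 1 : Nat) : Int) 0]) := by
  have hlen : PySem.List.len body = ((body.length : Nat) : Int) := by simp [pysem]
  rw [hlen]
  rw [show ((2 : Int)) = ((2 : Nat) : Int) from rfl, PySem.Int.floordiv_natCast,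
    PySem.List.pyRange_zero_natCast, List.map_map]
  apply List.map_congr_left
  intro k _
  norm_cast

theorem alt_slice_eq (body : List Int) :
    PySem.List.slice body (some (2 * PySem.Int.floordiv (PySem.List.len body) 2)) none
      = body.drop (2 * (body.length / 2)) := by
  have hlen : PySem.List.len body = ((body.length : Nat) : Int) := by simp [pysem]
  rw [hlen, show ((2 : Int)) = ((2 : Nat) : Int) from rfl, PySem.Int.floordiv_natCast]
  rw [show ((2 : Nat) : Int) * ((body.length / 2 : Nat) : Int) = ((2 * (body.length / 2) : Nat) : Int) by push_cast; ring]
  exact PySem.List.slice_from_natCast body _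

-- ===== VERDICT (by name: the statement is the Claim_ definition above) =====
theorem formGroups_spec : Claim_equal_formGroups := by
  intro room odd group3 pairs _ _
  unfold Spec_formGroups formGroups formGroups_alt
  by_cases h : (odd && group3) = true
  · simp only [h, if_pos]
    rw [formGroupsLoop_eq, alt_map_eq, alt_slice_eq]
  · simp only [h, if_neg, Bool.false_eq_true, not_false_iff]
    rw [formGroupsLoop_eq, alt_map_eq, alt_slice_eq]
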